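-- pv_equiv track=rewrite | github.com/darbom-yt/Fork | fork.py | mutate
-- ===== SOURCE A (Python) =====
-- SYMBOLS = list("!@#$%^&*_-?.")
--
-- YEARS = [str(y) for y in range(1970, 2031)]
--
-- SEASONS = ["spring","summer","fall","autumn","winter"]
--
-- KEY_WALKS = ["qwerty","asdf","zxcv","12345","09876","1q2w3e","qazwsx"]
--
-- LEET = {'a':['a','@','4'], 'e':['e','3'], 'i':['i','1'], 'o':['o','0'], 's':['s','$','5'], 't':['t','7'], 'b':['b','8'], 'g':['g','9']}
--
-- def leetify(word):
--     outs = {""}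
--     for c in word:
--         nxt = set()
--         for b in outs:
--             if c.lower() in LEET:
--                 for r in LEET[c.lower()]:
--                     nxt.add(b + r)
--             nxt.add(b + c)
--         outs = nxt
--     return outs
--
-- def patterns(word):
--     out = set()
--     for y in YEARS:
--         out.add(word + y); out.add(y + word)
--     for s in SEASONS:
--         out.add(word + s); out.add(s + word)
--     for k in KEY_WALKS:
--         out.add(word + k)
--     return out
--
-- def mutate(word):
--     out = set()
--     for v in leetify(word):
--         out.add(v); out.add(v.capitalize()); out.add(v.upper())
--         for s in SYMBOLS:
--             out.add(v + s); out.add(s + v)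
--         out |= patterns(v)
--     return out
-- ===== SOURCE B (Python) =====
-- SYMBOLS = list("!@#$%^&*_-?.")
--
-- YEARS = [str(y) for y in range(1970, 2031)]
--
-- SEASONS = ["spring","summer","fall","autumn","winter"]
--
-- KEY_WALKS = ["qwerty","asdf","zxcv","12345","09876","1q2w3e","qazwsx"]
--
-- LEET = {'a':['a','@','4'], 'e':['e','3'], 'i':['i','1'], 'o':['o','0'], 's':['s','$','5'], 't':['t','7'], 'b':['b','8'], 'g':['g','9']}
--
-- def _options(c):
--     l = c.lower()
--     return LEET[l] + [c] if l in LEET else [c]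
--
-- def leetify(word):
--     # recursion on the last character instead of a fold over the word
--     if not word:
--         return {""}
--     opts = _options(word[-1])
--     return {b + r for b in leetify(word[:-1]) for r in opts}
--
-- def patterns(word):
--     # one flat affix list, deduplicated once
--     return set([x for y in YEARS for x in (word + y, y + word)]
--                + [x for s in SEASONS for x in (word + s, s + word)]
--                + [word + k for k in KEY_WALKS])
--
-- def mutate(word):
--     out = set()
--     for v in leetify(word):
--         out.update((v, v.capitalize(), v.upper()))
--         out.update(x for s in SYMBOLS for x in (v + s, s + v))
--         out.update(patterns(v))
--     return out
-- ===== Notes on version B (the rewrite author's own statement) =====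
-- stated objective: alternative
-- what changed: B is a different decomposition of the same generation: leetify recurses on the word's last character with one per-level cross-product set comprehension over a precomputed option list instead of A's iterative fold with nested per-element set.add loops and an in-loop LEET test, patterns dedups one flat affix list instead of three add-loops, and mutate inserts whole batches with set.update instead of per-element adds.
import Mathlib
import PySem

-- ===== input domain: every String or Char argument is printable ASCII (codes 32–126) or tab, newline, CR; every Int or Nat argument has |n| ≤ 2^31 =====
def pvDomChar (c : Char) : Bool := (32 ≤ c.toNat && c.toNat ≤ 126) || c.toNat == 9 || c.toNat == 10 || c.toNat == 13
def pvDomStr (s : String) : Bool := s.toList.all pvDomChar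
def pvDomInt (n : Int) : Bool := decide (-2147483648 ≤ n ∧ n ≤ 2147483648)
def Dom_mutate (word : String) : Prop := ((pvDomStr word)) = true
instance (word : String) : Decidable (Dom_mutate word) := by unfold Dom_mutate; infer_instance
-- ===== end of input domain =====

-- B is a different decomposition of the same generation (objective: alternative): leetify
-- recurses on the word's last character with one per-level cross-product set comprehension
-- over a precomputed option list, patterns dedups one flat affix list, and mutate inserts
-- whole batches with set.update. Sets are PySem.Set lists holding the distinct elements in
-- first-insertion order; strings are handled as List Char via PySem.Chars (exact on the
-- ASCII domain).

-- ===== PORT A =====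
def pySYMBOLS : List Char := "!@#$%^&*_-?.".toList

def pyYEARS : List (List Char) := (PySem.List.pyRange 1970 2031 1).map PySem.Int.toChars

def pySEASONS : List (List Char) :=
  ["spring".toList, "summer".toList, "fall".toList, "autumn".toList, "winter".toList]

def pyKEY_WALKS : List (List Char) :=
  ["qwerty".toList, "asdf".toList, "zxcv".toList, "12345".toList, "09876".toList,
   "1q2w3e".toList, "qazwsx".toList]

def pyLEET : PySem.Dict Char (List Char) :=
  PySem.Dict.ofList [('a', ['a', '@', '4']), ('e', ['e', '3']), ('i', ['i', '1']),
    ('o', ['o', '0']), ('s', ['s', '$', '5']), ('t', ['t', '7']), ('b', ['b', '8']),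
    ('g', ['g', '9'])]

def leetifyA (word : List Char) : PySem.Set (List Char) :=
  word.foldl (fun outs c =>
      outs.foldl (fun nxt b =>
          PySem.Set.add
            (if pyLEET.contains (PySem.Chars.lowerChar c) then
               (pyLEET.getD (PySem.Chars.lowerChar c) []).foldl
                 (fun n r => PySem.Set.add n (b ++ [r])) nxt
             else nxt)
            (b ++ [c]))
        PySem.Set.empty)
    (PySem.Set.ofList [([] : List Char)])

-- str.capitalize(): first char uppercased, rest lowered (exact on ASCII)
def capitalizeChars : List Char → List Char
  | [] => []
  | c :: cs => PySem.Chars.upperChar c :: PySem.Chars.lower cs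

def patternsA (word : List Char) : PySem.Set (List Char) :=
  let out : PySem.Set (List Char) := PySem.Set.empty
  let out := pyYEARS.foldl
    (fun out y => PySem.Set.add (PySem.Set.add out (word ++ y)) (y ++ word)) out
  let out := pySEASONS.foldl
    (fun out s => PySem.Set.add (PySem.Set.add out (word ++ s)) (s ++ word)) out
  pyKEY_WALKS.foldl (fun out k => PySem.Set.add out (word ++ k)) out

def mutate (word : String) : List String :=
  ((leetifyA word.toList).foldl (fun out v =>
      let out := PySem.Set.add out v
      let out := PySem.Set.add out (capitalizeChars v)
      let out := PySem.Set.add out (PySem.Chars.upper v)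
      let out := pySYMBOLS.foldl
        (fun out s => PySem.Set.add (PySem.Set.add out (v ++ [s])) ([s] ++ v)) out
      PySem.Set.union out (patternsA v))
    PySem.Set.empty).map String.ofList

-- ===== PORT B =====
-- per-character option list: the LEET alternatives plus the original character
def optsList (c : Char) : List Char :=
  if pyLEET.contains (PySem.Chars.lowerChar c) then
    pyLEET.getD (PySem.Chars.lowerChar c) [] ++ [c]
  else [c]

-- leetify's recursion on the last character; the argument is the REVERSED word, so that
-- Source B's word[:-1] / word[-1] recursion becomes structural recursion on the head
def leetB : List Char → PySem.Set (List Char)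
  | [] => PySem.Set.ofList [[]]
  | c :: rest =>
    PySem.Set.ofList
      ((leetB rest).flatMap (fun b => (optsList c).map (fun r => b ++ [r])))

def leetifyB (word : List Char) : PySem.Set (List Char) :=
  leetB word.reverse

-- the flat affix list of patterns, in Source B's emission order
def patList (v : List Char) : List (List Char) :=
  pyYEARS.flatMap (fun y => [v ++ y, y ++ v])
  ++ pySEASONS.flatMap (fun s => [v ++ s, s ++ v])
  ++ pyKEY_WALKS.map (fun k => v ++ k)

def patternsB (word : List Char) : PySem.Set (List Char) :=
  PySem.Set.ofList (patList word)

def mutate_alt (word : String) : List String :=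
  ((leetifyB word.toList).foldl (fun out v =>
      let out := PySem.Set.update out [v, capitalizeChars v, PySem.Chars.upper v]
      let out := PySem.Set.update out
        (pySYMBOLS.flatMap (fun s => [v ++ [s], s :: v]))
      PySem.Set.update out (patternsB v))
    PySem.Set.empty).map String.ofList

-- ===== PRECONDITION & SPEC =====
def Spec_mutate (word : String) (out : List String) : Prop := out = mutate_alt word
instance (word : String) (out : List String) : Decidable (Spec_mutate word out) := by
  unfold Spec_mutate; infer_instance

-- ===== CLAIM =====
def Claim_equal_mutate : Prop := ∀ (word : String), Dom_mutate word → Spec_mutate word (mutate word)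

-- ===== LEMMAS AND PROOFS =====

-- a loop doing one whole-batch Set.update per element is one update with the flattened batches
lemma foldl_update_flatMap {α β : Type} [BEq α] (f : β → List α) :
    ∀ (l : List β) (acc : PySem.Set α),
      l.foldl (fun s x => PySem.Set.update s (f x)) acc
        = PySem.Set.update acc (l.flatMap f) := by
  intro l
  induction l with
  | nil => intro acc; simp [PySem.Set.update_nil]
  | cons x l ih =>
    intro acc
    rw [List.foldl_cons, ih, List.flatMap_cons, PySem.Set.update_append]

-- A's inner-loop body for one prefix b is one batched update with b's option strings
lemma bodyA_eq_update (c : Char) (b : List Char) (nxt : PySem.Set (List Char)) :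
    PySem.Set.add
      (if pyLEET.contains (PySem.Chars.lowerChar c) then
         (pyLEET.getD (PySem.Chars.lowerChar c) []).foldl
           (fun n r => PySem.Set.add n (b ++ [r])) nxt
       else nxt)
      (b ++ [c])
    = PySem.Set.update nxt ((optsList c).map (fun r => b ++ [r])) := by
  unfold optsList
  by_cases h : pyLEET.contains (PySem.Chars.lowerChar c)
  · rw [if_pos h, if_pos h, ← PySem.Set.update_map_eq_foldl_add, List.map_append,
      List.map_singleton, PySem.Set.update_append]
    rfl
  · rw [if_neg h, if_neg h, List.map_singleton]
    rfl

-- A's level over all prefixes is one dedup of the level's raw cross product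
lemma levelA_eq (c : Char) (S : PySem.Set (List Char)) :
    S.foldl (fun nxt b =>
        PySem.Set.add
          (if pyLEET.contains (PySem.Chars.lowerChar c) then
             (pyLEET.getD (PySem.Chars.lowerChar c) []).foldl
               (fun n r => PySem.Set.add n (b ++ [r])) nxt
           else nxt)
          (b ++ [c]))
      PySem.Set.empty
    = PySem.Set.ofList (S.flatMap (fun b => (optsList c).map (fun r => b ++ [r]))) := by
  have hfun : (fun (nxt : PySem.Set (List Char)) b =>
      PySem.Set.add
        (if pyLEET.contains (PySem.Chars.lowerChar c) then
           (pyLEET.getD (PySem.Chars.lowerChar c) []).foldl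
             (fun n r => PySem.Set.add n (b ++ [r])) nxt
         else nxt)
        (b ++ [c]))
      = (fun nxt b => PySem.Set.update nxt ((optsList c).map (fun r => b ++ [r]))) :=
    funext fun nxt => funext fun b => bodyA_eq_update c b nxt
  rw [hfun, foldl_update_flatMap,
    show (PySem.Set.empty : PySem.Set (List Char)) = [] from rfl, PySem.Set.update_nil_left]

-- A's leetify fold with its per-level body rewritten to the dedup-of-cross-product form
lemma leetify_fold_eq :
    ∀ (w : List Char) (S : PySem.Set (List Char)),
      w.foldl (fun outs c =>
          outs.foldl (fun nxt b =>
              PySem.Set.add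
                (if pyLEET.contains (PySem.Chars.lowerChar c) then
                   (pyLEET.getD (PySem.Chars.lowerChar c) []).foldl
                     (fun n r => PySem.Set.add n (b ++ [r])) nxt
                 else nxt)
                (b ++ [c]))
            PySem.Set.empty)
        S
      = w.foldl (fun outs c =>
          PySem.Set.ofList (outs.flatMap (fun b => (optsList c).map (fun r => b ++ [r]))))
        S := by
  intro w
  induction w with
  | nil => intro S; rfl
  | cons c w ih =>
    intro S
    rw [List.foldl_cons, List.foldl_cons, levelA_eq]
    exact ih _

-- A's left-to-right level fold is B's recursion on the last character (right induction)
lemma fold_eq_leetB (w : List Char) :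
    w.foldl (fun outs c =>
        PySem.Set.ofList (outs.flatMap (fun b => (optsList c).map (fun r => b ++ [r]))))
      (PySem.Set.ofList [[]])
    = leetB w.reverse := by
  induction w using List.reverseRecOn with
  | nil => rfl
  | append_singleton w c ih =>
    rw [List.foldl_append, List.foldl_cons, List.foldl_nil, ih, List.reverse_append]
    rfl

-- the two leetify implementations agree
lemma leetify_eq (w : List Char) : leetifyA w = leetifyB w := by
  unfold leetifyA leetifyB
  rw [leetify_fold_eq, show PySem.Set.ofList [([] : List Char)] = PySem.Set.ofList [[]] from rfl,
    fold_eq_leetB]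

-- A's patterns set is B's dedup of the flat affix list
lemma patterns_eq (w : List Char) : patternsA w = patternsB w := by
  unfold patternsA patternsB patList
  rw [show (fun (out : PySem.Set (List Char)) (y : List Char) =>
        PySem.Set.add (PySem.Set.add out (w ++ y)) (y ++ w))
      = (fun out y => PySem.Set.update out [w ++ y, y ++ w]) from rfl,
    show (fun (out : PySem.Set (List Char)) (k : List Char) => PySem.Set.add out (w ++ k))
      = (fun out k => PySem.Set.update out [w ++ k]) from rfl,
    foldl_update_flatMap, foldl_update_flatMap, foldl_update_flatMap,
    ← PySem.Set.update_append, ← PySem.Set.update_append]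
  rw [show (PySem.Set.empty : PySem.Set (List Char)) = [] from rfl, PySem.Set.update_nil_left]
  rw [List.append_assoc, ← List.map_eq_flatMap]

-- A's per-variant body and B's batched-update body agree
lemma mutate_body_eq (out : PySem.Set (List Char)) (v : List Char) :
    PySem.Set.union
      (pySYMBOLS.foldl
        (fun out s => PySem.Set.add (PySem.Set.add out (v ++ [s])) ([s] ++ v))
        (PySem.Set.add (PySem.Set.add (PySem.Set.add out v) (capitalizeChars v))
          (PySem.Chars.upper v)))
      (patternsA v)
    = PySem.Set.update
        (PySem.Set.update (PySem.Set.update out [v, capitalizeChars v, PySem.Chars.upper v])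
          (pySYMBOLS.flatMap (fun s => [v ++ [s], s :: v])))
        (patternsB v) := by
  rw [show (fun (out : PySem.Set (List Char)) (s : Char) =>
        PySem.Set.add (PySem.Set.add out (v ++ [s])) ([s] ++ v))
      = (fun out s => PySem.Set.update out [v ++ [s], s :: v]) from rfl,
    foldl_update_flatMap, ← patterns_eq]
  rfl

-- ===== VERDICT (by name: the statement is the Claim_ definition above) =====
theorem mutate_spec : Claim_equal_mutate := by
  intro word _
  unfold Spec_mutate mutate mutate_alt
  rw [leetify_eq,
    show (fun (out : PySem.Set (List Char)) v =>
        PySem.Set.union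
          (pySYMBOLS.foldl
            (fun out s => PySem.Set.add (PySem.Set.add out (v ++ [s])) ([s] ++ v))
            (PySem.Set.add (PySem.Set.add (PySem.Set.add out v) (capitalizeChars v))
              (PySem.Chars.upper v)))
          (patternsA v))
      = (fun out v =>
          PySem.Set.update
            (PySem.Set.update
              (PySem.Set.update out [v, capitalizeChars v, PySem.Chars.upper v])
              (pySYMBOLS.flatMap (fun s => [v ++ [s], s :: v])))
            (patternsB v))
      from funext fun out => funext fun v => mutate_body_eq out v]
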